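-- pv_equiv track=rewrite | github.com/BuDozKeN/AI-council | backend/routers/company/activity_impl.py | _extract_unique_related_ids
-- ===== SOURCE A (Python) =====
-- from typing import Set, Dict, List, Optional, Tuple
--
-- def _extract_unique_related_ids(logs: List[Dict]) -> Tuple[List[str], List[str]]:
--     """
--     Extract unique playbook and decision IDs from logs for navigation.
--
--     Args:
--         logs: List of activity logs
--
--     Returns:
--         Tuple of (playbook_ids, decision_ids)
--     """
--     playbook_ids = list(set(
--         log["related_id"] for log in logs
--         if log.get("related_type") == "playbook" and log.get("related_id")
--     ))
--
--     decision_ids = list(set(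
--         log["related_id"] for log in logs
--         if log.get("related_type") == "decision" and log.get("related_id")
--     ))
--
--     return playbook_ids, decision_ids
-- ===== SOURCE B (Python) =====
-- from collections import defaultdict
-- from typing import Dict, List, Tuple
--
-- def _extract_unique_related_ids(logs: List[Dict]) -> Tuple[List[str], List[str]]:
--     """Single pass: group related_ids into per-type set buckets, then read two buckets."""
--     buckets = defaultdict(set)
--     for log in logs:
--         rid = log.get("related_id")
--         if rid:
--             buckets[log.get("related_type")].add(rid)
--     return list(buckets.get("playbook", set())), list(buckets.get("decision", set()))
-- ===== Notes on version B (the rewrite author's own statement) =====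
-- stated objective: alternative
-- what changed: Replaces two independent filtered scans (one per type) with a single pass that builds one dict-of-sets grouping table keyed by related_type, then reads the two buckets.
import Mathlib
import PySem

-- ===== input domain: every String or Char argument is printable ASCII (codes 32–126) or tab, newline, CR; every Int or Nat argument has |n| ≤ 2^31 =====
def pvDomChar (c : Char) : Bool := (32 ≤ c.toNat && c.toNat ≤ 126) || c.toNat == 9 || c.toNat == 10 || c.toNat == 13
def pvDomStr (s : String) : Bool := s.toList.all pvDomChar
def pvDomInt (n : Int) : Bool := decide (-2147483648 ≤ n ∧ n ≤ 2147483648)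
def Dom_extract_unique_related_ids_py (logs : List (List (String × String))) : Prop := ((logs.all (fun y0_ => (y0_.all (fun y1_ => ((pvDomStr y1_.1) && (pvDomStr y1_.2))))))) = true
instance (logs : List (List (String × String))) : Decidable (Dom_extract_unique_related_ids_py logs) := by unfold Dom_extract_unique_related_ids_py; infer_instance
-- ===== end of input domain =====

-- B replaces A's two independent filtered scans by one pass building a dict-of-sets
-- grouping table keyed by related_type (objective: alternative, same cost).
-- Both ports return the distinct ids in first-occurrence order; Python's list(set(...))
-- hash iteration order is not modelled (outputs are set-valued lists).

-- ===== PORT A =====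
-- log.get(k) on a log given as an association list
def pvGetKey (log : List (String × String)) (k : String) : Option String :=
  (PySem.Dict.mk log).get? k

-- Python truthiness of an Optional[str]
def pvTruthy (o : Option String) : Bool :=
  match o with
  | some s => !(s == "")
  | none => false

-- the comprehension's filter condition
def pvCond (t : String) (log : List (String × String)) : Bool :=
  (pvGetKey log "related_type" == some t) && pvTruthy (pvGetKey log "related_id")

def extract_unique_related_ids_py (logs : List (List (String × String))) : List String × List String :=
  let playbook_ids := PySem.Set.ofList
    ((logs.filter (pvCond "playbook")).map
      (fun log => (pvGetKey log "related_id").getD ""))  -- guard ensures the key is present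
  let decision_ids := PySem.Set.ofList
    ((logs.filter (pvCond "decision")).map
      (fun log => (pvGetKey log "related_id").getD ""))
  (playbook_ids, decision_ids)

-- ===== PORT B =====
-- body of B's single for-loop: add rid into buckets[related_type] when rid is truthy
def pvStep (d : PySem.Dict (Option String) (PySem.Set String)) (log : List (String × String)) :
    PySem.Dict (Option String) (PySem.Set String) :=
  match pvGetKey log "related_id" with
  | some rid =>
      if rid == "" then d
      else d.modify (pvGetKey log "related_type") PySem.Set.empty (fun s => s.add rid)
  | none => d

def extract_unique_related_ids_py_alt (logs : List (List (String × String))) : List String × List String :=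
  let buckets := logs.foldl pvStep PySem.Dict.empty
  (buckets.getD (some "playbook") PySem.Set.empty, buckets.getD (some "decision") PySem.Set.empty)

-- ===== PRECONDITION & SPEC =====
def Spec_extract_unique_related_ids_py (logs : List (List (String × String))) (out : List String × List String) : Prop := out = extract_unique_related_ids_py_alt logs
instance (logs : List (List (String × String))) (out : List String × List String) : Decidable (Spec_extract_unique_related_ids_py logs out) := by unfold Spec_extract_unique_related_ids_py; infer_instance

-- ===== CLAIM (what is proved, stated in full; the proofs are below) =====
def Claim_equal_extract_unique_related_ids_py : Prop := ∀ (logs : List (List (String × String))), Dom_extract_unique_related_ids_py logs → Spec_extract_unique_related_ids_py logs (extract_unique_related_ids_py logs)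

-- ===== LEMMAS AND PROOFS =====

-- the id contributed by one log to the bucket of type t (none if filtered out)
def pvPick (t : String) (log : List (String × String)) : Option String :=
  match pvGetKey log "related_id" with
  | some rid =>
      if rid == "" then none
      else if pvGetKey log "related_type" == some t then some rid else none
  | none => none

lemma pvFold_getD (t : String) :
    ∀ (logs : List (List (String × String))) (d : PySem.Dict (Option String) (PySem.Set String)),
      (logs.foldl pvStep d).getD (some t) PySem.Set.empty
        = (logs.filterMap (pvPick t)).foldl PySem.Set.add (d.getD (some t) PySem.Set.empty) := by
  intro logs
  induction logs with
  | nil => intro d; rfl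
  | cons log rest ih =>
    intro d
    rw [List.foldl_cons, List.filterMap_cons]
    cases h : pvGetKey log "related_id" with
    | none =>
      have hpk : pvPick t log = none := by simp [pvPick, h]
      have hst : pvStep d log = d := by simp [pvStep, h]
      rw [hpk, hst, ih]
    | some rid =>
      by_cases he : rid = ""
      · have hpk : pvPick t log = none := by simp [pvPick, h, he]
        have hst : pvStep d log = d := by simp [pvStep, h, he]
        rw [hpk, hst, ih]
      · by_cases ht : pvGetKey log "related_type" = some t
        · have hpk : pvPick t log = some rid := by simp [pvPick, h, he, ht]
          have hst : pvStep d log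
              = d.modify (some t) PySem.Set.empty (fun s => s.add rid) := by
            simp [pvStep, h, he, ht]
          rw [hpk, hst, ih, List.foldl_cons, PySem.Dict.getD_modify_self]
        · have hpk : pvPick t log = none := by simp [pvPick, h, he, ht]
          have hst : pvStep d log
              = d.modify (pvGetKey log "related_type") PySem.Set.empty (fun s => s.add rid) := by
            simp [pvStep, h, he]
          have hne : ¬ ((some t : Option String) = pvGetKey log "related_type") := by
            intro hh; exact ht hh.symm
          rw [hpk, hst, ih, PySem.Dict.getD_modify, if_neg hne]

lemma pvFilterMap (t : String) (logs : List (List (String × String))) :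
    (logs.filter (pvCond t)).map (fun log => (pvGetKey log "related_id").getD "")
    = logs.filterMap (pvPick t) := by
  induction logs with
  | nil => rfl
  | cons log rest ih =>
    rw [List.filter_cons, List.filterMap_cons]
    cases h : pvGetKey log "related_id" with
    | none =>
      have hpk : pvPick t log = none := by simp [pvPick, h]
      have hc : pvCond t log = false := by simp [pvCond, pvTruthy, h]
      simp [hpk, hc, ih]
    | some rid =>
      by_cases he : rid = ""
      · have hpk : pvPick t log = none := by simp [pvPick, h, he]
        have hc : pvCond t log = false := by simp [pvCond, pvTruthy, h, he]
        simp [hpk, hc, ih]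
      · by_cases ht : pvGetKey log "related_type" = some t
        · have hpk : pvPick t log = some rid := by simp [pvPick, h, he, ht]
          have hc : pvCond t log = true := by simp [pvCond, pvTruthy, h, he, ht]
          simp [hpk, hc, ih, h]
        · have hpk : pvPick t log = none := by simp [pvPick, h, he, ht]
          have hc : pvCond t log = false := by simp [pvCond, pvTruthy, h, he, ht]
          simp [hpk, hc, ih]

lemma pvBucket (t : String) (logs : List (List (String × String))) :
    PySem.Set.ofList ((logs.filter (pvCond t)).map (fun log => (pvGetKey log "related_id").getD ""))
    = (logs.foldl pvStep PySem.Dict.empty).getD (some t) PySem.Set.empty := by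
  rw [pvFilterMap, pvFold_getD]
  rfl

-- ===== VERDICT (by name: the statement is the Claim_ definition above) =====
theorem extract_unique_related_ids_py_spec : Claim_equal_extract_unique_related_ids_py := by
  intro logs _
  show _ = _
  unfold extract_unique_related_ids_py extract_unique_related_ids_py_alt
  rw [pvBucket "playbook" logs, pvBucket "decision" logs]
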